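-- pv_equiv track=rewrite | github.com/hdesai17/Digest_It | app/main.py | lysc_digest
-- ===== SOURCE A (Python) =====
-- def lysc_digest(protein_sequence):
--     peptides = []
--     # Split the sequence after each occurrence of K
--     cutsites = [0] + [i+1 for i, aa in enumerate(protein_sequence) if aa == 'K']
--     for i in range(len(cutsites)-1):
--         peptide = protein_sequence[cutsites[i]:cutsites[i+1]]
--         peptides.append(peptide)
--
--     # Add N-terminal and C-terminal peptides
--     if cutsites:
--         n_terminal_peptide = protein_sequence[:cutsites[0]]
--         peptides.insert(0, n_terminal_peptide)
--         c_terminal_peptide = protein_sequence[cutsites[-1]:]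
--         peptides.append(c_terminal_peptide)
--
--     return [peptide for peptide in peptides if peptide]
-- ===== SOURCE B (Python) =====
-- def lysc_digest(protein_sequence):
--     # Single pass with an accumulator: flush the current peptide after each 'K';
--     # a nonempty trailing residue becomes the last peptide.
--     peptides = []
--     current = []
--     for aa in protein_sequence:
--         current.append(aa)
--         if aa == 'K':
--             peptides.append(''.join(current))
--             current = []
--     if current:
--         peptides.append(''.join(current))
--     return peptides
-- ===== Notes on version B (the rewrite author's own statement) =====
-- stated objective: simpler
-- what changed: Replaced the cut-site index list, range-indexed slicing, sentinel insert/append and final emptiness filter by a single accumulator pass that flushes the current peptide after each 'K'; no index arithmetic, slicing or filtering remains.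
import Mathlib
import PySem

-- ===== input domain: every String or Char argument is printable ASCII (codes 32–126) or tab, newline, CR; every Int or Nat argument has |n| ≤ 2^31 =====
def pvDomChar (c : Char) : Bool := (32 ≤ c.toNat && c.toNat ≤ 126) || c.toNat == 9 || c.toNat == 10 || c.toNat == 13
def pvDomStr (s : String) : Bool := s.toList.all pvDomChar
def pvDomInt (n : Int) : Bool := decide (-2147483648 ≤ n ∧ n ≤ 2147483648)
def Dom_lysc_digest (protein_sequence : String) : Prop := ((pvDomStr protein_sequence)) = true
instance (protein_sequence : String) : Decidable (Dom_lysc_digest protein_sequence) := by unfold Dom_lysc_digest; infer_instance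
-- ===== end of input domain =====

-- B replaces A's cut-site index list + range-indexed slicing + sentinel insert/append + final
-- emptiness filter by a single accumulator pass that flushes the current peptide after each 'K'
-- (objective: simpler; same return value).

-- ===== PORT A =====
-- peptides are built as List Char and turned into String on return (String ↔ List Char bridge)
def lysc_digest (protein_sequence : String) : List String :=
  let cs := protein_sequence.toList
  let peptides : List (List Char) := []
  -- cutsites = [0] + [i+1 for i, aa in enumerate(protein_sequence) if aa == 'K']
  let cutsites : List Int :=
    [0] ++ (PySem.List.enumerate cs 0).filterMap
      (fun p => if p.2 = 'K' then some (p.1 + 1) else none)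
  -- for i in range(len(cutsites)-1): peptides.append(protein_sequence[cutsites[i]:cutsites[i+1]])
  let peptides :=
    (PySem.List.pyRange 0 ((cutsites.length : Int) - 1) 1).foldl
      (fun acc i =>
        acc ++ [PySem.List.slice cs (some (PySem.List.pyGetD cutsites i 0))
                                    (some (PySem.List.pyGetD cutsites (i + 1) 0))])
      peptides
  -- if cutsites: prepend protein_sequence[:cutsites[0]], append protein_sequence[cutsites[-1]:]
  let peptides :=
    if cutsites ≠ [] then
      let n_terminal := PySem.List.slice cs none (some (PySem.List.pyGetD cutsites 0 0))
      let peptides := n_terminal :: peptides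
      let c_terminal := PySem.List.slice cs (some (PySem.List.pyGetD cutsites (-1) 0)) none
      peptides ++ [c_terminal]
    else peptides
  -- return [peptide for peptide in peptides if peptide]
  (peptides.filter (fun p => !p.isEmpty)).map String.ofList

-- ===== PORT B =====
-- current.append(aa); flush current after each 'K'
def bStep (st : List String × List Char) (aa : Char) : List String × List Char :=
  let cur := st.2 ++ [aa]
  if aa = 'K' then (st.1 ++ [String.ofList cur], []) else (st.1, cur)

-- if current: peptides.append(''.join(current))
def bFin (r : List String × List Char) : List String :=
  if !r.2.isEmpty then r.1 ++ [String.ofList r.2] else r.1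

def lysc_digest_alt (protein_sequence : String) : List String :=
  bFin (protein_sequence.toList.foldl bStep ([], []))

-- ===== PRECONDITION & SPEC =====
def Spec_lysc_digest (protein_sequence : String) (out : List String) : Prop := out = lysc_digest_alt protein_sequence
instance (protein_sequence : String) (out : List String) : Decidable (Spec_lysc_digest protein_sequence out) := by unfold Spec_lysc_digest; infer_instance

-- ===== CLAIM (what is proved, stated in full; the proofs are below) =====
def Claim_equal_lysc_digest : Prop := ∀ (protein_sequence : String), Dom_lysc_digest protein_sequence → Spec_lysc_digest protein_sequence (lysc_digest protein_sequence)

-- ===== LEMMAS AND PROOFS =====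

/-- Reference splitter: the pieces obtained by cutting after each 'K'. -/
def chunksK : List Char → List (List Char)
  | [] => []
  | c :: cs =>
    if c = 'K' then [c] :: chunksK cs
    else match chunksK cs with
      | [] => [[c]]
      | p :: ps => (c :: p) :: ps

/-- One-past-the-end positions of the 'K's of `cs`, offset by start `s`. -/
def kEnds (cs : List Char) (s : Int) : List Int :=
  (PySem.List.enumerate cs s).filterMap (fun p => if p.2 = 'K' then some (p.1 + 1) else none)

/-- Slices of `cs` between adjacent entries of a cut-position list. -/
def adjS (cs : List Char) : List Int → List (List Char)
  | p :: q :: rest => PySem.List.slice cs (some p) (some q) :: adjS cs (q :: rest)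
  | _ => []

theorem kEnds_cons (c : Char) (cs : List Char) (s : Int) :
    kEnds (c :: cs) s = (if c = 'K' then [s + 1] else []) ++ kEnds cs (s + 1) := by
  by_cases h : c = 'K' <;>
    simp [kEnds, PySem.List.enumerate_cons, h]

theorem kEnds_shift (cs : List Char) (s : Int) :
    kEnds cs (s + 1) = (kEnds cs s).map (· + 1) := by
  induction cs generalizing s with
  | nil => rfl
  | cons c cs ih =>
      rw [kEnds_cons c cs (s + 1), kEnds_cons c cs s, ih (s + 1), List.map_append]
      split <;> simp

theorem kEnds_bounds (cs : List Char) (q : Int) (hq : q ∈ kEnds cs 0) :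
    1 ≤ q ∧ q ≤ (cs.length : Int) := by
  induction cs generalizing q with
  | nil => simp [kEnds] at hq
  | cons c cs ih =>
      rw [kEnds_cons, kEnds_shift] at hq
      simp only [List.mem_append, List.mem_map] at hq
      rcases hq with hq | ⟨x, hx, rfl⟩
      · have hq1 : q = 1 := by
          split at hq
          · have := List.mem_singleton.mp hq
            omega
          · simp at hq
        subst hq1
        simp only [List.length_cons]
        push_cast
        exact ⟨trivial, by omega⟩
      · have := ih x hx
        simp only [List.length_cons]
        push_cast
        omega

theorem slice_shift (c : Char) (cs : List Char) (p q : Int) (hp : 0 ≤ p) (hq : 0 ≤ q) :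
    PySem.List.slice (c :: cs) (some (p + 1)) (some (q + 1)) =
      PySem.List.slice cs (some p) (some q) := by
  rw [PySem.List.slice_toNat _ (by omega) (by omega), PySem.List.slice_toNat _ hp hq]
  have h1 : (p + 1).toNat = p.toNat + 1 := by omega
  have h2 : (q + 1).toNat = q.toNat + 1 := by omega
  simp [h1, h2]

theorem slice_from_shift (c : Char) (cs : List Char) (p : Int) (hp : 0 ≤ p) :
    PySem.List.slice (c :: cs) (some (p + 1)) none = PySem.List.slice cs (some p) none := by
  rw [PySem.List.slice_from _ (by omega), PySem.List.slice_from _ hp]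
  have h1 : (p + 1).toNat = p.toNat + 1 := by omega
  simp [h1]

theorem slice_zero_cons (c : Char) (cs : List Char) (q : Int) (hq : 0 ≤ q) :
    PySem.List.slice (c :: cs) (some 0) (some (q + 1)) = c :: PySem.List.slice cs (some 0) (some q) := by
  rw [PySem.List.slice_toNat _ (by omega) (by omega), PySem.List.slice_toNat _ le_rfl hq]
  have h1 : (q + 1).toNat = q.toNat + 1 := by omega
  simp [h1]

theorem adjS_shift (c : Char) (cs : List Char) (l : List Int) (h : ∀ x ∈ l, 0 ≤ x) :
    adjS (c :: cs) (l.map (· + 1)) = adjS cs l := by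
  induction l with
  | nil => rfl
  | cons p l ih =>
      cases l with
      | nil => rfl
      | cons q rest =>
          simp only [List.map_cons, adjS]
          rw [slice_shift c cs p q (h p (by simp)) (h q (by simp))]
          have := ih (fun x hx => h x (List.mem_cons_of_mem _ hx))
          simp only [List.map_cons] at this
          rw [this]

theorem getLastD_map_add_one (l : List Int) (d : Int) :
    (l.map (· + 1)).getLastD (d + 1) = l.getLastD d + 1 := by
  induction l generalizing d with
  | nil => rfl
  | cons p l ih => simp only [List.map_cons, List.getLastD_cons]; exact ih p

theorem getLastD_cons_map_add_one (p : Int) (l : List Int) :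
    ((p :: l).map (· + 1)).getLastD 0 = (p :: l).getLastD 0 + 1 := by
  simp only [List.map_cons, List.getLastD_cons]
  exact getLastD_map_add_one l p

theorem getLastD_nonneg (l : List Int) (d : Int) (hd : 0 ≤ d) (h : ∀ x ∈ l, 0 ≤ x) :
    0 ≤ l.getLastD d := by
  induction l generalizing d with
  | nil => simpa
  | cons p l ih =>
      rw [List.getLastD_cons]
      exact ih p (h p (by simp)) (fun x hx => h x (List.mem_cons_of_mem _ hx))

theorem range_map_adjS (cs : List Char) (l : List Int) :
    (List.range (l.length - 1)).map
        (fun k => PySem.List.slice cs (some (l.getD k 0)) (some (l.getD (k + 1) 0)))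
      = adjS cs l := by
  induction l with
  | nil => rfl
  | cons p l ih =>
      cases l with
      | nil => rfl
      | cons q rest =>
          simp only [List.length_cons, Nat.add_sub_cancel, adjS]
          rw [List.range_succ_eq_map, List.map_cons, List.map_map, ← ih]
          simp [Function.comp_def]

/-- Main A-side characterisation: adjacent cut-site slices plus the trailing slice,
    empties filtered out, give exactly the reference splitting. -/
theorem A_main (cs : List Char) :
    ((adjS cs (0 :: kEnds cs 0) ++
        [PySem.List.slice cs (some ((0 :: kEnds cs 0).getLastD 0)) none]).filter
      (fun p => !p.isEmpty)) = chunksK cs := by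
  induction cs with
  | nil => rfl
  | cons c cs ih =>
      have hb : ∀ x ∈ kEnds cs 0, 0 ≤ x := fun x hx => le_trans (by omega) (kEnds_bounds cs x hx).1
      have hb0 : ∀ x ∈ (0 : Int) :: kEnds cs 0, 0 ≤ x := by
        intro x hx; rcases List.mem_cons.mp hx with rfl | hx
        · exact le_rfl
        · exact hb x hx
      rw [kEnds_cons c cs 0, kEnds_shift cs 0]
      by_cases hc : c = 'K'
      · subst hc
        rw [if_pos rfl]
        have e0 : ((0 : Int) + 1) = 1 := by norm_num
        rw [e0, List.singleton_append]
        have e1 : adjS ('K' :: cs) ((0 : Int) :: 1 :: (kEnds cs 0).map (· + 1))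
            = PySem.List.slice ('K' :: cs) (some 0) (some 1) ::
                adjS ('K' :: cs) (1 :: (kEnds cs 0).map (· + 1)) := rfl
        rw [e1]
        have hhead : PySem.List.slice ('K' :: cs) (some 0) (some 1) = ['K'] := by
          rw [PySem.List.slice_toNat _ le_rfl (by norm_num)]
          simp
        rw [hhead]
        have e2 : ((1 : Int) :: (kEnds cs 0).map (· + 1)) = ((0 :: kEnds cs 0).map (· + 1)) := by
          simp
        rw [e2, adjS_shift 'K' cs _ hb0]
        have e3 : ((0 : Int) :: (0 :: kEnds cs 0).map (· + 1)).getLastD 0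
            = (0 :: kEnds cs 0).getLastD 0 + 1 := by
          rw [List.getLastD_cons]
          exact getLastD_cons_map_add_one 0 (kEnds cs 0)
        rw [e3, slice_from_shift 'K' cs _ (getLastD_nonneg _ 0 le_rfl hb0)]
        rw [List.cons_append, List.filter_cons]
        simp only [List.isEmpty_cons, Bool.not_false, if_pos]
        rw [ih]
        rfl
      · rw [if_neg hc, List.nil_append]
        cases hks : kEnds cs 0 with
        | nil =>
            rw [hks] at ih
            simp only [List.map_nil]
            have htr : PySem.List.slice (c :: cs) (some (((0 : Int) :: ([] : List Int)).getLastD 0)) none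
                = c :: cs := by
              simp [PySem.List.slice_from _ le_rfl]
            have htr' : PySem.List.slice cs (some (((0 : Int) :: ([] : List Int)).getLastD 0)) none
                = cs := by
              simp [PySem.List.slice_from _ le_rfl]
            rw [htr]
            rw [htr'] at ih
            show List.filter _ ([] ++ [c :: cs]) = _
            rw [List.nil_append, List.filter_cons]
            simp only [List.isEmpty_cons, Bool.not_false, if_pos, List.filter_nil]
            have ih' : List.filter (fun p => !p.isEmpty) [cs] = chunksK cs := ih
            cases cs with
            | nil => simp [chunksK]
            | cons d ds =>
                rw [List.filter_cons] at ih'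
                simp only [List.isEmpty_cons, Bool.not_false, if_pos, List.filter_nil] at ih'
                conv_rhs => rw [chunksK]
                rw [if_neg hc, ← ih']
        | cons q qs =>
            have hq : 1 ≤ q ∧ q ≤ (cs.length : Int) :=
              kEnds_bounds cs q (hks ▸ List.mem_cons_self ..)
            rw [hks] at ih hb
            rw [List.map_cons]
            have e1 : adjS (c :: cs) ((0 : Int) :: (q + 1) :: qs.map (· + 1))
                = PySem.List.slice (c :: cs) (some 0) (some (q + 1)) ::
                    adjS (c :: cs) ((q + 1) :: qs.map (· + 1)) := rfl
            rw [e1, slice_zero_cons c cs q (by omega)]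
            have e2 : ((q + 1) :: qs.map (· + 1)) = ((q :: qs).map (· + 1)) := by simp
            rw [e2, adjS_shift c cs _ hb]
            have e3 : ((0 : Int) :: (q :: qs).map (· + 1)).getLastD 0
                = (q :: qs).getLastD 0 + 1 := by
              rw [List.getLastD_cons]
              exact getLastD_cons_map_add_one q qs
            rw [e3, slice_from_shift c cs _ (getLastD_nonneg _ 0 le_rfl (by
              intro x hx; exact hb x hx))]
            have eadj : adjS cs ((0 : Int) :: q :: qs)
                = PySem.List.slice cs (some 0) (some q) :: adjS cs (q :: qs) := rfl
            have elast : ((0 : Int) :: q :: qs).getLastD 0 = (q :: qs).getLastD 0 :=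
              List.getLastD_cons ..
            rw [eadj, elast] at ih
            have hne : (PySem.List.slice cs (some 0) (some q)).isEmpty = false := by
              rw [PySem.List.slice_toNat _ le_rfl (by omega)]
              simp only [Int.toNat_zero, List.drop_zero, Nat.sub_zero]
              have hlne : cs ≠ [] := by
                intro h; subst h; simp at hq; omega
              simp only [List.isEmpty_eq_false_iff, ne_eq, List.take_eq_nil_iff, not_or]
              exact ⟨by omega, hlne⟩
            rw [List.cons_append, List.filter_cons] at ih
            rw [hne] at ih
            simp only [Bool.not_false, if_pos] at ih
            rw [List.cons_append, List.filter_cons]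
            simp only [List.isEmpty_cons, Bool.not_false, if_pos]
            simp only [chunksK, if_neg hc, ← ih]

/-- Merge a pending (K-free) accumulator into the chunk list. -/
def mergeC (cur : List Char) : List (List Char) → List (List Char)
  | [] => if cur.isEmpty then [] else [cur]
  | p :: ps => (cur ++ p) :: ps

theorem mergeC_nil (l : List (List Char)) : mergeC [] l = l := by
  cases l <;> simp [mergeC]

/-- B-side fold invariant. -/
theorem B_inv (cs : List Char) (peps : List String) (cur : List Char) :
    bFin (cs.foldl bStep (peps, cur)) = peps ++ (mergeC cur (chunksK cs)).map String.ofList := by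
  induction cs generalizing peps cur with
  | nil =>
      simp only [List.foldl_nil, bFin, mergeC, chunksK]
      cases hcur : cur.isEmpty <;> simp
  | cons c cs ih =>
      simp only [List.foldl_cons]
      by_cases hc : c = 'K'
      · subst hc
        rw [show bStep (peps, cur) 'K' = (peps ++ [String.ofList (cur ++ ['K'])], []) from by
          simp [bStep]]
        rw [ih, mergeC_nil]
        simp [chunksK, mergeC]
      · rw [show bStep (peps, cur) c = (peps, cur ++ [c]) from by simp [bStep, hc]]
        rw [ih]
        simp only [chunksK, if_neg hc]
        cases hch : chunksK cs with
        | nil => simp [mergeC]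
        | cons p ps => simp [mergeC]

/-- A's port computes the reference splitting. -/
theorem A_eq (s : String) :
    lysc_digest s = (chunksK s.toList).map String.ofList := by
  unfold lysc_digest
  simp only []
  set cs := s.toList with hcs
  set ks := kEnds cs 0 with hks
  have hcut : ([(0:Int)] ++ (PySem.List.enumerate cs 0).filterMap
      (fun p => if p.2 = 'K' then some (p.1 + 1) else none)) = (0 :: ks) := by
    rw [hks]; rfl
  rw [hcut]
  rw [PySem.List.foldl_append_singleton_eq_map]
  have hlen : (((0 :: ks).length : Int) - 1) = ((ks.length : Nat) : Int) := by
    simp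
  rw [hlen, PySem.List.pyRange_one]
  have hrange : ((((ks.length : Nat) : Int) - 0).toNat) = ks.length := by omega
  rw [hrange, List.map_map]
  have hmapeq : (List.range ks.length).map
      ((fun i => PySem.List.slice cs (some (PySem.List.pyGetD (0 :: ks) i 0))
          (some (PySem.List.pyGetD (0 :: ks) (i + 1) 0))) ∘ (fun k : Nat => (0 : Int) + ↑k))
      = (List.range ((0 :: ks).length - 1)).map
        (fun k => PySem.List.slice cs (some ((0 :: ks).getD k 0)) (some ((0 :: ks).getD (k + 1) 0))) := by
    apply List.map_congr_left
    intro k _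
    simp only [Function.comp_apply, zero_add]
    have h1 : PySem.List.pyGetD (0 :: ks) (k : Int) 0 = (0 :: ks).getD k 0 :=
      PySem.List.pyGetD_natCast ..
    have h2 : PySem.List.pyGetD (0 :: ks) ((k : Int) + 1) 0 = (0 :: ks).getD (k + 1) 0 := by
      rw [show ((k : Int) + 1) = ((k + 1 : Nat) : Int) from by push_cast; ring]
      exact PySem.List.pyGetD_natCast ..
    rw [h1, h2]
  rw [hmapeq, range_map_adjS]
  rw [if_pos (by simp : ((0:Int) :: ks) ≠ [])]
  have hn : PySem.List.slice cs none (some (PySem.List.pyGetD (0 :: ks) 0 0)) = [] := by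
    rw [PySem.List.pyGetD_zero_cons, PySem.List.slice_to _ le_rfl]
    simp
  have hcterm : PySem.List.pyGetD (0 :: ks) (-1) 0 = (0 :: ks).getLastD 0 := by
    rw [PySem.List.pyGetD_neg_one (h := by simp)]
    rfl
  rw [hn, hcterm]
  rw [List.cons_append, List.filter_cons]
  simp only [List.isEmpty_nil, Bool.not_true, Bool.false_eq_true, if_false]
  rw [List.nil_append, hks, A_main cs]

/-- B's port computes the reference splitting. -/
theorem B_eq (s : String) :
    lysc_digest_alt s = (chunksK s.toList).map String.ofList := by
  unfold lysc_digest_alt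
  rw [B_inv s.toList [] [], mergeC_nil]
  rfl

-- ===== VERDICT (by name: the statement is the Claim_ definition above) =====
theorem lysc_digest_spec : Claim_equal_lysc_digest := by
  intro s _
  unfold Spec_lysc_digest
  rw [A_eq, B_eq]
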